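-- pv_equiv track=rewrite | github.com/mustafamajeed276/searching | asciicode.py | asciiCode
-- ===== SOURCE A (Python) =====
-- def asciiCode(barcode):
--
--     li = []
--     for i in barcode:
--         n = ord(i)
--
--         if n//10:
--             maxi = 0
--             while n>0:
--                 if n%10 > maxi:
--                     maxi = n%10
--                 n = n//10
--             li.append(maxi)
--         else:
--             li.append(n)
--
--     return sum(li)
-- ===== SOURCE B (Python) =====
-- def asciiCode(barcode):
--     return sum(max(int(d) for d in str(ord(c))) for c in barcode)
-- ===== Notes on version B (the rewrite author's own statement) =====
-- stated objective: simpler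
-- what changed: B is a one-line sum that extracts each character's max digit from the decimal string of its code, replacing A's appended list, the n//10 single-digit branch and the %10 peeling while-loop.
import Mathlib
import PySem

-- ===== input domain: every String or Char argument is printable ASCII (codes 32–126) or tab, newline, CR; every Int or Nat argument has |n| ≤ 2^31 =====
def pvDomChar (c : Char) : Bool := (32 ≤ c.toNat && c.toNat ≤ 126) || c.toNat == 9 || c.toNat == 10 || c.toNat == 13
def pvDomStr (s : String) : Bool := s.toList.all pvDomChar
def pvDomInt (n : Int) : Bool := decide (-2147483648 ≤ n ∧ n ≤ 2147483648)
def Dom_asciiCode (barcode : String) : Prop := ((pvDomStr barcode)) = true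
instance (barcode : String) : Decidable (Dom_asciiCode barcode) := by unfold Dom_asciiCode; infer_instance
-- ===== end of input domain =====

-- B replaces A's list building, single-digit branch and %10 while-loop by a one-line
-- sum of max decimal-string digits (objective: simpler).

-- ===== PORT A =====
-- the while-loop 'while n>0: if n%10>maxi: maxi=n%10; n=n//10'; n = ord(i) ≥ 0, so Nat
-- division/mod coincide with Python's floor // and %; fuel (= initial n, an upper bound
-- on the iteration count since n strictly decreases) only makes the same loop total
def asciiMaxLoop : Nat → Nat → Int → Int
  | 0, _, maxi => maxi
  | fuel + 1, n, maxi =>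
    if n > 0 then
      asciiMaxLoop fuel (n / 10) (if ((n % 10 : Nat) : Int) > maxi then ((n % 10 : Nat) : Int) else maxi)
    else maxi

def asciiCode (barcode : String) : Int :=
  (barcode.toList.foldl (fun li i =>
      let n := i.toNat
      if n / 10 ≠ 0 then li ++ [asciiMaxLoop n n 0] else li ++ [(n : Int)]) []).sum

-- ===== PORT B =====
-- max(int(d) for d in str(ord(c))): str(n) is nonempty, so the [] arm is unreachable;
-- int(d) for a single decimal digit char d is its value d.toNat - 48 (exact here)
def charMaxDigit (c : Char) : Int :=
  match (PySem.Int.toChars (c.toNat : Int)).map (fun d => ((d.toNat - 48 : Nat) : Int)) with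
  | [] => 0
  | x :: xs => xs.foldl max x

def asciiCode_alt (barcode : String) : Int :=
  (barcode.toList.map charMaxDigit).sum

-- ===== PRECONDITION & SPEC =====
def Spec_asciiCode (barcode : String) (out : Int) : Prop := out = asciiCode_alt barcode
instance (barcode : String) (out : Int) : Decidable (Spec_asciiCode barcode out) := by unfold Spec_asciiCode; infer_instance

-- ===== CLAIM (what is proved, stated in full; the proofs are below) =====
def Claim_equal_asciiCode : Prop := ∀ (barcode : String), Dom_asciiCode barcode → Spec_asciiCode barcode (asciiCode barcode)

-- ===== LEMMAS AND PROOFS =====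
-- per-code agreement of the two digit extractions, by exhausting the finite code domain
set_option maxHeartbeats 2000000 in
theorem perCode (n : Nat) (h : n ≤ 126) :
    (if n / 10 ≠ 0 then asciiMaxLoop n n 0 else (n : Int)) =
      (match (PySem.Int.toChars (n : Int)).map (fun d => ((d.toNat - 48 : Nat) : Int)) with
       | [] => 0
       | x :: xs => xs.foldl max x) := by
  interval_cases n <;> decide

theorem perChar (c : Char) (h : pvDomChar c = true) :
    (if c.toNat / 10 ≠ 0 then asciiMaxLoop c.toNat c.toNat 0 else (c.toNat : Int)) = charMaxDigit c := by
  have hle : c.toNat ≤ 126 := by simp [pvDomChar] at h; omega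
  rw [charMaxDigit]
  exact perCode c.toNat hle

theorem asciiCode_eq (barcode : String) (h : Dom_asciiCode barcode) :
    asciiCode barcode = asciiCode_alt barcode := by
  unfold asciiCode asciiCode_alt
  have hfun : (fun (li : List Int) (i : Char) =>
      let n := i.toNat
      if n / 10 ≠ 0 then li ++ [asciiMaxLoop n n 0] else li ++ [(n : Int)]) =
      (fun (li : List Int) (i : Char) =>
        li ++ [if i.toNat / 10 ≠ 0 then asciiMaxLoop i.toNat i.toNat 0 else (i.toNat : Int)]) := by
    funext li i
    by_cases hc : i.toNat / 10 ≠ 0 <;> simp [hc]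
  rw [hfun, PySem.List.foldl_append_singleton_eq_map, List.nil_append]
  congr 1
  apply List.map_congr_left
  intro c hc
  have hd : pvDomChar c = true := by
    unfold Dom_asciiCode pvDomStr at h
    exact (List.all_eq_true.mp h) c hc
  exact perChar c hd

-- ===== VERDICT (by name: the statement is the Claim_ definition above) =====
theorem asciiCode_spec : Claim_equal_asciiCode := by
  intro barcode h
  unfold Spec_asciiCode
  exact asciiCode_eq barcode h
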